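-- pv_equiv track=rewrite | github.com/hethon/Advent-Of-Code-2023 | Day 3 - Gear Ratios/part1.py | get_nbhd_of
-- ===== SOURCE A (Python) =====
-- def get_nbhd_of(index, row, dxn=0):
-- 	'''
-- 	returns a neighbourhood of row[index] from the given row
-- 	a neighbourhood of a number is defined as an ordered collection of numbers around the number, including the number
-- 	'''
-- 	if index == -1 or index == len(row) or not row[index].isdigit():
-- 		return ""
-- 	if dxn == -1:
-- 		return get_nbhd_of(index-1, row=row, dxn=-1) + row[index]
-- 	if dxn == 1:
-- 		return row[index] + get_nbhd_of(index+1, row=row, dxn=1)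
-- 	return get_nbhd_of(index-1, row=row, dxn=-1) + row[index] + get_nbhd_of(index+1, row=row, dxn=1)
-- ===== SOURCE B (Python) =====
-- def get_nbhd_of(index, row, dxn=0):
--     if index == -1 or index == len(row) or not row[index].isdigit():
--         return ""
--     left = ""
--     if dxn != 1:
--         i = index - 1
--         while i != -1:
--             c = row[i]
--             if not c.isdigit():
--                 break
--             left = c + left
--             i -= 1
--     right = ""
--     if dxn != -1:
--         i = index + 1
--         while i != len(row):
--             c = row[i]
--             if not c.isdigit():
--                 break
--             right += c
--             i += 1
--     return left + row[index] + right
-- ===== Notes on version B (the rewrite author's own statement) =====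
-- stated objective: alternative
-- what changed: Replaces A's three-way recursion with a guard plus two one-sided iterative while-loop scans accumulating the left and right digit runs into strings.
-- outside the precondition, e.g. on get_nbhd_of(-2, 'a12', 0): A returns '1', B returns '12'
import Mathlib
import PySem

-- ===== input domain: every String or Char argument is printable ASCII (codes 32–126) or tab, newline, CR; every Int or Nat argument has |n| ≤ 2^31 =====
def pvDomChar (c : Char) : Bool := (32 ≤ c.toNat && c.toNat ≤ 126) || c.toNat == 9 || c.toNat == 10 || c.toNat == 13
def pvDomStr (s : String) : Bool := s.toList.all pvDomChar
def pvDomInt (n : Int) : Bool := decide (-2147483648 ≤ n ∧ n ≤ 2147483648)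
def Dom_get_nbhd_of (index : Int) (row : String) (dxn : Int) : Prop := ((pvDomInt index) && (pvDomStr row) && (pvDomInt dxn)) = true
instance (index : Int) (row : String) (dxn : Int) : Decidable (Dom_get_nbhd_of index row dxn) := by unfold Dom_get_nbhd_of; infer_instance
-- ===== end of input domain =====

-- B replaces A's three-way recursion by a guard plus two one-sided iterative scans with accumulators (alternative decomposition, same cost).


-- ===== PORT A =====
-- A's recursion, fuel only makes the same recursion total (under Pre_ it never runs out).
def getNbhdGo : Nat → Int → List Char → Int → List Char
  | 0, _, _, _ => []
  | fuel+1, index, row, dxn =>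
    if index = -1 ∨ index = (row.length : Int) then []
    else
      match PySem.List.pyGet? row index with
      | none => []   -- Python raises IndexError here; excluded by Pre_
      | some c =>
        if PySem.Chars.isdigit c then
          if dxn = -1 then getNbhdGo fuel (index-1) row (-1) ++ [c]
          else if dxn = 1 then c :: getNbhdGo fuel (index+1) row 1
          else getNbhdGo fuel (index-1) row (-1) ++ c :: getNbhdGo fuel (index+1) row 1
        else []

def get_nbhd_of (index : Int) (row : String) (dxn : Int) : String :=
  String.ofList (getNbhdGo (row.toList.length + 2) index row.toList dxn)

-- ===== PORT B =====
-- B's leftward while loop: prepend digits onto acc until i == -1 / non-digit (none = IndexError, outside Pre_).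
def altLeftGo : Nat → Int → List Char → List Char → List Char
  | 0, _, _, acc => acc
  | fuel+1, i, row, acc =>
    if i = -1 then acc
    else
      match PySem.List.pyGet? row i with
      | none => acc
      | some c => if PySem.Chars.isdigit c then altLeftGo fuel (i-1) row (c :: acc) else acc

-- B's rightward while loop: append digits to acc until i == len(row) / non-digit.
def altRightGo : Nat → Int → List Char → List Char → List Char
  | 0, _, _, acc => acc
  | fuel+1, i, row, acc =>
    if i = (row.length : Int) then acc
    else
      match PySem.List.pyGet? row i with
      | none => acc
      | some c => if PySem.Chars.isdigit c then altRightGo fuel (i+1) row (acc ++ [c]) else acc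

def get_nbhd_of_alt (index : Int) (row : String) (dxn : Int) : String :=
  let r := row.toList
  if index = -1 ∨ index = (r.length : Int) then ""
  else
    match PySem.List.pyGet? r index with
    | none => ""
    | some c =>
      if PySem.Chars.isdigit c then
        let left := if dxn ≠ 1 then altLeftGo (r.length + 2) (index-1) r [] else []
        let right := if dxn ≠ -1 then altRightGo (r.length + 2) (index+1) r [] else []
        String.ofList (left ++ c :: right)
      else ""

-- ===== PRECONDITION & SPEC =====
-- Pre_ excludes indices outside -1..len(row): there Python's A either raises IndexError or
-- returns accidental values through negative-index wraparound (e.g. index -2), which B does not reproduce.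
def Pre_get_nbhd_of (index : Int) (row : String) (dxn : Int) : Prop :=
  -1 ≤ index ∧ index ≤ (row.toList.length : Int)
instance (index : Int) (row : String) (dxn : Int) : Decidable (Pre_get_nbhd_of index row dxn) := by unfold Pre_get_nbhd_of; infer_instance

def pvWitness_get_nbhd_of : Int × String × Int := (2, "a12b", 0)

def Spec_get_nbhd_of (index : Int) (row : String) (dxn : Int) (out : String) : Prop := out = get_nbhd_of_alt index row dxn
instance (index : Int) (row : String) (dxn : Int) (out : String) : Decidable (Spec_get_nbhd_of index row dxn out) := by unfold Spec_get_nbhd_of; infer_instance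

-- ===== CLAIM (what is proved, stated in full; the proofs are below) =====
def Claim_equal_get_nbhd_of : Prop := ∀ (index : Int) (row : String) (dxn : Int), Dom_get_nbhd_of index row dxn → Pre_get_nbhd_of index row dxn → Spec_get_nbhd_of index row dxn (get_nbhd_of index row dxn)

-- ===== LEMMAS AND PROOFS =====

-- A's leftward recursion appended to acc equals B's leftward loop on acc.
lemma left_eq (k : Nat) : ∀ (f g : Nat) (i : Int) (row : List Char) (acc : List Char),
    -1 ≤ i → i + 1 ≤ (k : Int) → k < f → k < g →
    getNbhdGo f i row (-1) ++ acc = altLeftGo g i row acc := by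
  induction k with
  | zero =>
    intro f g i row acc h1 h2 hf hg
    have hi : i = -1 := by omega
    match f, g with
    | f'+1, g'+1 =>
      subst hi
      simp [getNbhdGo, altLeftGo]
  | succ k ih =>
    intro f g i row acc h1 h2 hf hg
    match f, g with
    | f'+1, g'+1 =>
      by_cases hi : i = -1
      · subst hi; simp [getNbhdGo, altLeftGo]
      · have hi0 : 0 ≤ i := by omega
        by_cases hl : i = (row.length : Int)
        · have hnone : PySem.List.pyGet? row i = none := by
            rw [PySem.List.pyGet?_eq_none_iff]
            simp [PySem.Raise.InRange]; omega
          simp [getNbhdGo, altLeftGo, hi, hl, hnone]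
        · simp only [getNbhdGo, altLeftGo, hi, hl, or_self, if_false, if_neg (by tauto : ¬ (i = -1 ∨ i = (row.length : Int)))]
          cases hget : PySem.List.pyGet? row i with
          | none => simp
          | some c =>
            by_cases hd : PySem.Chars.isdigit c = true
            · simp only [hd, if_true, if_pos rfl]
              rw [List.append_assoc]
              exact ih f' g' (i-1) row (c :: acc) (by omega) (by omega) (by omega) (by omega)
            · simp [hd]

-- acc appended with A's rightward recursion equals B's rightward loop on acc.
lemma right_eq (k : Nat) : ∀ (f g : Nat) (i : Int) (row : List Char) (acc : List Char),
    0 ≤ i → (row.length : Int) - i ≤ (k : Int) → k < f → k < g →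
    acc ++ getNbhdGo f i row 1 = altRightGo g i row acc := by
  induction k with
  | zero =>
    intro f g i row acc h1 h2 hf hg
    match f, g with
    | f'+1, g'+1 =>
      have hnone : PySem.List.pyGet? row i = none := by
        rw [PySem.List.pyGet?_eq_none_iff]
        simp [PySem.Raise.InRange]; omega
      by_cases hl : i = (row.length : Int)
      · simp [getNbhdGo, altRightGo, hl, hnone]
      · simp [getNbhdGo, altRightGo, hl, hnone, show i ≠ -1 by omega]
  | succ k ih =>
    intro f g i row acc h1 h2 hf hg
    match f, g with
    | f'+1, g'+1 =>
      by_cases hl : i = (row.length : Int)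
      · have hnone : PySem.List.pyGet? row i = none := by
          rw [PySem.List.pyGet?_eq_none_iff]
          simp [PySem.Raise.InRange]; omega
        simp [getNbhdGo, altRightGo, hl, hnone]
      · simp only [getNbhdGo, altRightGo, if_neg hl, if_neg (by push_neg; omega : ¬ (i = -1 ∨ i = (row.length : Int)))]
        cases hget : PySem.List.pyGet? row i with
        | none => simp
        | some c =>
          by_cases hd : PySem.Chars.isdigit c = true
          · simp only [hd, if_true, if_neg (by decide : ¬ (1 : Int) = -1), if_pos rfl]
            rw [show acc ++ c :: getNbhdGo f' (i+1) row 1 = (acc ++ [c]) ++ getNbhdGo f' (i+1) row 1 by simp]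
            exact ih f' g' (i+1) row (acc ++ [c]) (by omega) (by omega) (by omega) (by omega)
          · simp [hd]

-- one-step unfolding of A's recursion (used to avoid unfolding inner calls)
lemma getNbhdGo_succ (fuel : Nat) (index : Int) (row : List Char) (dxn : Int) :
    getNbhdGo (fuel+1) index row dxn =
      (if index = -1 ∨ index = (row.length : Int) then []
       else
         match PySem.List.pyGet? row index with
         | none => []
         | some c =>
           if PySem.Chars.isdigit c then
             if dxn = -1 then getNbhdGo fuel (index-1) row (-1) ++ [c]
             else if dxn = 1 then c :: getNbhdGo fuel (index+1) row 1
             else getNbhdGo fuel (index-1) row (-1) ++ c :: getNbhdGo fuel (index+1) row 1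
           else []) := rfl

-- ===== VERDICT (by name: the statement is the Claim_ definition above) =====
theorem get_nbhd_of_spec : Claim_equal_get_nbhd_of := by
  unfold Claim_equal_get_nbhd_of
  intro index row dxn _ hpre
  obtain ⟨h1, h2⟩ := hpre
  unfold Spec_get_nbhd_of get_nbhd_of get_nbhd_of_alt
  set r := row.toList with hr
  rw [show r.length + 2 = (r.length + 1) + 1 from rfl, getNbhdGo_succ]
  by_cases hg : index = -1 ∨ index = (r.length : Int)
  · rw [if_pos hg, if_pos hg]
  · have h0 : 0 ≤ index := by omega
    have hlt : index < (r.length : Int) := by omega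
    rw [if_neg hg, if_neg hg]
    cases hget : PySem.List.pyGet? r index with
    | none =>
      exfalso
      rw [PySem.List.pyGet?_eq_none_iff] at hget
      exact hget (by simp [PySem.Raise.InRange]; omega)
    | some c =>
      by_cases hd : PySem.Chars.isdigit c = true
      · simp only [hd, if_true]
        have hL : getNbhdGo (r.length + 1) (index - 1) r (-1) =
            altLeftGo (r.length + 2) (index - 1) r [] := by
          have := left_eq index.toNat (r.length + 1) (r.length + 2) (index - 1) r []
            (by omega) (by omega) (by omega) (by omega)
          simpa using this
        have hR : getNbhdGo (r.length + 1) (index + 1) r 1 =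
            altRightGo (r.length + 2) (index + 1) r [] := by
          have := right_eq r.length (r.length + 1) (r.length + 2) (index + 1) r []
            (by omega) (by omega) (by omega) (by omega)
          simpa using this
        by_cases hm1 : dxn = -1
        · rw [if_pos hm1, hL]
          simp [hm1]
        · by_cases hp1 : dxn = 1
          · rw [if_neg hm1, if_pos hp1, hR]
            simp [hp1]
          · rw [if_neg hm1, if_neg hp1, hL, hR]
            simp [hm1, hp1]
      · simp [hd]
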